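-- pv_equiv track=rewrite | github.com/MrGbro/algorithm-daily-py | april/chart0413.py | longest_test
-- ===== SOURCE A (Python) =====
-- from typing import List
--
-- def longest_test(path: List[int]) -> int:
--     l: int = 0
--     r: int = 1
--     last: int = l
--     max_len: int = 0
--     while r < len(path):
--         if path[last] == path[r]:
--             l = r
--         last = r
--         r += 1
--         max_len = max(r - l - 1, max_len)
--     return max_len
-- ===== SOURCE B (Python) =====
-- from typing import List
-- from itertools import groupby
--
-- def longest_test(path: List[int]) -> int:
--     diffs = [path[i] != path[i - 1] for i in range(1, len(path))]
--     return max((sum(1 for _ in g) for key, g in groupby(diffs) if key), default=0)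
-- ===== Notes on version B (the rewrite author's own statement) =====
-- stated objective: idiomatic
-- what changed: Replaces the index-juggling while loop (l/last/r pointers with running max of r-l-1) by building the adjacent-difference boolean list and taking the longest run of True via itertools.groupby.
import Mathlib
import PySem

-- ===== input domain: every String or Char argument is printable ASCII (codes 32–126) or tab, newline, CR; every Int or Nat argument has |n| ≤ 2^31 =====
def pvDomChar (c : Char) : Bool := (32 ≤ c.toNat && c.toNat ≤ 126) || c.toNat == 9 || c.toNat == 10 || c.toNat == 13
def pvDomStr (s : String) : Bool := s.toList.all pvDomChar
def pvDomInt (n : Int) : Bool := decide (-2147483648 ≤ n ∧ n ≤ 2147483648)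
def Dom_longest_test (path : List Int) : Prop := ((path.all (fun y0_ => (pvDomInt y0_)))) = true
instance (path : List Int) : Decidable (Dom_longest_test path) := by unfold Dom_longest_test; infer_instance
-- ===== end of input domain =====

-- B replaces A's index-juggling while loop by "adjacent-difference list + longest run of True
-- via groupby" (idiomatic decomposition; same O(n) cost). Equivalence is proved for all inputs.

-- ===== PORT A =====
-- Transliteration of A's while loop: state (l, last, r, max_len); indices are kept as Nat
-- (exact: in A they start at 0/1 and only ever take values 0 ≤ l ≤ last < r, so they are
-- never negative), and path[last] / path[r] become List.getD (exact: the loop guard gives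
-- r < len, and l ≤ last < r, so both indices are in range and Python never raises).
def longest_test_go (path : List Int) (l last r : Nat) (maxLen : Int) : Int :=
  if r < path.length then
    let l' := if path.getD last 0 == path.getD r 0 then r else l
    longest_test_go path l' r (r + 1) (max ((r : Int) + 1 - (l' : Int) - 1) maxLen)
  else maxLen
termination_by path.length - r
decreasing_by omega

def longest_test (path : List Int) : Int :=
  longest_test_go path 0 0 1 0

-- ===== PORT B =====
-- diffs = [path[i] != path[i-1] for i in range(1, len(path))]  (i ≥ 1 in the range, so the
-- .toNat conversions are exact; indices i, i-1 < len are in range, so getD is exact).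
def longest_test_diffs (path : List Int) : List Bool :=
  (PySem.List.pyRange 1 path.length 1).map
    (fun i => path.getD i.toNat 0 != path.getD (i - 1).toNat 0)

-- itertools.groupby: take the maximal leading run equal to `d`, returning (run length, rest).
def longest_test_takeRun (d : Bool) : List Bool → Nat × List Bool
  | [] => (0, [])
  | x :: xs =>
      if x = d then
        let p := longest_test_takeRun d xs
        (p.1 + 1, p.2)
      else (0, x :: xs)

theorem longest_test_takeRun_len (d : Bool) : ∀ xs : List Bool,
    (longest_test_takeRun d xs).2.length ≤ xs.length := by
  intro xs
  induction xs with
  | nil => simp [longest_test_takeRun]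
  | cons x xs ih =>
      by_cases h : x = d <;> simp [longest_test_takeRun, h] <;> omega

-- list(groupby(diffs)) as (key, run length) pairs; run lengths as Int (Python's sum(...)).
def longest_test_groups : List Bool → List (Bool × Int)
  | [] => []
  | d :: ds =>
      (d, ((longest_test_takeRun d ds).1 : Int) + 1) ::
        longest_test_groups (longest_test_takeRun d ds).2
termination_by l => l.length
decreasing_by have := longest_test_takeRun_len d ds; simp; omega

-- max((len(g) for key, g in groups if key), default=0): run lengths are ≥ 1, so the
-- 0-default max is a fold of max from 0 over the True runs.
def longest_test_alt (path : List Int) : Int :=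
  (longest_test_groups (longest_test_diffs path)).foldl
    (fun acc p => if p.1 then max acc p.2 else acc) 0

-- ===== PRECONDITION & SPEC =====
def Spec_longest_test (path : List Int) (out : Int) : Prop := out = longest_test_alt path
instance (path : List Int) (out : Int) : Decidable (Spec_longest_test path out) := by unfold Spec_longest_test; infer_instance

-- ===== CLAIM (what is proved, stated in full; the proofs are below) =====
def Claim_equal_longest_test : Prop := ∀ (path : List Int), Dom_longest_test path → Spec_longest_test path (longest_test path)

-- ===== LEMMAS AND PROOFS =====

-- The common yardstick: a running-counter pass over the boolean edge list.
def pvCnt : List Bool → Int → Int → Int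
  | [], _, b => b
  | d :: ds, c, b =>
      let c' := if d then c + 1 else 0
      pvCnt ds c' (max c' b)

-- Edge list in zipWith form (proved equal to longest_test_diffs below).
def pvEdges (path : List Int) : List Bool :=
  List.zipWith (fun a b => b != a) path path.tail

theorem pvEdges_length (path : List Int) : (pvEdges path).length = path.length - 1 := by
  simp [pvEdges]

theorem pvDiffs_eq_edges (path : List Int) :
    longest_test_diffs path = pvEdges path := by
  unfold longest_test_diffs
  rw [PySem.List.pyRange_one]
  apply List.ext_getElem
  · simp [pvEdges]
  · intro i h1 h2
    have hlen : ((path.length : Int) - 1).toNat = path.length - 1 := by omega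
    simp only [List.getElem_map, List.getElem_range, pvEdges, List.getElem_zipWith]
    have hi : i < path.length - 1 := by simpa [hlen] using h1
    have h1' : i + 1 < path.length := by omega
    have hcast : ((1 : Int) + i).toNat = i + 1 := by omega
    have hcast2 : ((1 : Int) + i - 1).toNat = i := by omega
    rw [hcast, hcast2]
    rw [List.getD_eq_getElem _ _ h1', List.getD_eq_getElem _ _ (by omega : i < path.length)]
    simp [List.getElem_tail]

-- pvCnt only depends on its Int arguments up to equality (used to normalise casts).
theorem pvCnt_congr (l : List Bool) {c c' b b' : Int} (hc : c = c') (hb : b = b') :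
    pvCnt l c b = pvCnt l c' b' := by rw [hc, hb]

-- A's loop computes the running-counter pass over the edge list.
theorem longest_test_go_eq (n : Nat) : ∀ (path : List Int) (k l : Nat) (b : Int),
    path.length ≤ k + 1 + n → l ≤ k →
    longest_test_go path l k (k + 1) b = pvCnt ((pvEdges path).drop k) ((k : Int) - (l : Int)) b := by
  induction n with
  | zero =>
      intro path k l b hlen hl
      rw [longest_test_go]
      have h1 : ¬ (k + 1 < path.length) := by omega
      have h2 : (pvEdges path).drop k = [] := by
        apply List.drop_eq_nil_of_le
        rw [pvEdges_length]; omega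
      simp [h1, h2, pvCnt]
  | succ n ih =>
      intro path k l b hlen hl
      by_cases h : k + 1 < path.length
      · have hk : k < (pvEdges path).length := by rw [pvEdges_length]; omega
        have hget : (pvEdges path)[k] = (path.getD (k+1) 0 != path.getD k 0) := by
          simp only [pvEdges, List.getElem_zipWith]
          rw [List.getD_eq_getElem _ _ (by omega : k + 1 < path.length),
              List.getD_eq_getElem _ _ (by omega : k < path.length)]
          simp [List.getElem_tail]
        rw [longest_test_go, if_pos h, List.drop_eq_getElem_cons hk, hget]
        by_cases heq : path.getD k 0 = path.getD (k+1) 0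
        · -- equal neighbours: l' := r, the counter resets to 0
          have hbe : (path.getD k 0 == path.getD (k+1) 0) = true := beq_iff_eq.mpr heq
          have hbne : (path.getD (k+1) 0 != path.getD k 0) = false := by
            rw [bne_eq_false_iff_eq]; exact heq.symm
          rw [hbe, if_pos rfl]
          simp only [pvCnt, hbne, Bool.false_eq_true, if_false]
          refine (ih path (k+1) (k+1) _ (by omega) (le_refl _)).trans
            (pvCnt_congr _ ?_ ?_) <;> push_cast <;> omega
        · -- unequal neighbours: l' := l, the counter grows by one
          have hbe : (path.getD k 0 == path.getD (k+1) 0) = false := beq_eq_false_iff_ne.mpr heq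
          have hbne : (path.getD (k+1) 0 != path.getD k 0) = true :=
            bne_iff_ne.mpr (fun hh => heq hh.symm)
          rw [hbe, if_neg (by simp), hbne]
          simp only [pvCnt, if_pos rfl]
          refine (ih path (k+1) l _ (by omega) (by omega)).trans
            (pvCnt_congr _ ?_ ?_) <;> push_cast <;> omega
      · rw [longest_test_go]
        have h2 : (pvEdges path).drop k = [] := by
          apply List.drop_eq_nil_of_le
          rw [pvEdges_length]; omega
        simp [h, h2, pvCnt]

theorem longest_test_eq_cnt (path : List Int) :
    longest_test path = pvCnt (pvEdges path) 0 0 := by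
  have := longest_test_go_eq path.length path 0 0 0 (by omega) (le_refl _)
  simpa using this

-- B-side: counter pass through a maximal True run / False run.
theorem pvCnt_true_run : ∀ (ds : List Bool) (c b : Int), c ≤ b →
    pvCnt ds c b =
      pvCnt (longest_test_takeRun true ds).2
        (c + (longest_test_takeRun true ds).1)
        (max (c + (longest_test_takeRun true ds).1) b) := by
  intro ds
  induction ds with
  | nil =>
      intro c b hcb
      simp only [longest_test_takeRun, pvCnt]
      omega
  | cons x xs ih =>
      intro c b hcb
      cases x with
      | true =>
          simp only [longest_test_takeRun, if_pos, pvCnt, if_true]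
          have h1 : c + 1 ≤ max (c + 1) b := le_max_left _ _
          rw [ih (c+1) (max (c+1) b) h1]
          have hn : (0:Int) ≤ ((longest_test_takeRun true xs).1 : Int) := by positivity
          congr 1 <;> [skip; omega] <;> push_cast <;> ring
      | false =>
          simp only [longest_test_takeRun, Bool.false_eq_true, if_neg, if_false]
          simp only [pvCnt]
          have : max c b = b := by omega
          simp [this]

theorem pvCnt_false_run : ∀ (ds : List Bool) (b : Int), 0 ≤ b →
    pvCnt ds 0 b = pvCnt (longest_test_takeRun false ds).2 0 b := by
  intro ds
  induction ds with
  | nil => intro b hb; simp [longest_test_takeRun]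
  | cons x xs ih =>
      intro b hb
      cases x with
      | false =>
          simp only [longest_test_takeRun, if_pos, pvCnt, Bool.false_eq_true, if_false]
          have : max (0:Int) b = b := by omega
          rw [this, ih b hb]
      | true =>
          simp [longest_test_takeRun, pvCnt]

theorem pvTakeRun_head_ne (d : Bool) : ∀ (xs : List Bool) (x : Bool) (r : List Bool),
    (longest_test_takeRun d xs).2 = x :: r → x ≠ d := by
  intro xs
  induction xs with
  | nil => intro x r h; simp [longest_test_takeRun] at h
  | cons y ys ih =>
      intro x r h
      by_cases hy : y = d
      · simp only [longest_test_takeRun, hy, if_pos] at h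
        exact ih x r h
      · simp only [longest_test_takeRun, hy, if_neg, if_false] at h
        injection h with h1 _
        rw [← h1]; exact hy

-- dropping the stale counter after a run (the next element, if any, is False).
theorem pvCnt_reset (rest : List Bool) (c B : Int)
    (h : rest = [] ∨ ∃ r', rest = false :: r') :
    pvCnt rest c B = pvCnt rest 0 B := by
  rcases h with h | ⟨r', h⟩ <;> subst h
  · rfl
  · simp only [pvCnt, Bool.false_eq_true, if_false]

theorem pvCnt_eq_groups : ∀ (n : Nat) (ds : List Bool) (b : Int), ds.length ≤ n → 0 ≤ b →
    pvCnt ds 0 b =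
      (longest_test_groups ds).foldl (fun acc p => if p.1 then max acc p.2 else acc) b := by
  intro n
  induction n with
  | zero =>
      intro ds b hlen hb
      have : ds = [] := List.eq_nil_of_length_eq_zero (by omega)
      subst this
      simp [longest_test_groups, pvCnt]
  | succ n ih =>
      intro ds b hlen hb
      cases ds with
      | nil => simp [longest_test_groups, pvCnt]
      | cons d ds =>
          have hrest := longest_test_takeRun_len d ds
          have hlen' : ds.length ≤ n := by simp at hlen; omega
          rw [longest_test_groups]
          cases d with
          | true =>
              simp only [pvCnt, if_true, List.foldl_cons, if_pos]
              have h1 : (1:Int) ≤ max 1 b := le_max_left _ _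
              rw [pvCnt_congr ds (show (0:Int)+1 = 1 by ring)
                    (show max ((0:Int)+1) b = max 1 b by norm_num)]
              rw [pvCnt_true_run ds 1 (max 1 b) h1]
              set res := longest_test_takeRun true ds with hres
              rw [show (1:Int) + res.1 = (res.1:Int) + 1 by ring,
                  show max ((res.1:Int) + 1) (max 1 b) = max b ((res.1:Int) + 1) by omega]
              have hhead : res.2 = [] ∨ ∃ r', res.2 = false :: r' := by
                cases hx : res.2 with
                | nil => exact Or.inl rfl
                | cons x r' =>
                    right
                    have := pvTakeRun_head_ne true ds x r' (by rw [← hres]; exact hx)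
                    cases x with
                    | false => exact ⟨r', rfl⟩
                    | true => exact absurd rfl this
              rw [pvCnt_reset res.2 _ _ hhead]
              exact ih res.2 _ (by omega) (by omega)
          | false =>
              simp only [pvCnt, Bool.false_eq_true, if_false, List.foldl_cons]
              rw [show max (0:Int) b = b by omega, pvCnt_false_run ds b hb]
              exact ih _ b (by omega) hb

theorem longest_test_alt_eq_cnt (path : List Int) :
    longest_test_alt path = pvCnt (pvEdges path) 0 0 := by
  unfold longest_test_alt
  rw [pvDiffs_eq_edges]
  exact (pvCnt_eq_groups (pvEdges path).length (pvEdges path) 0 (le_refl _) (le_refl _)).symm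

-- ===== VERDICT (by name: the statement is the Claim_ definition above) =====
theorem longest_test_spec : Claim_equal_longest_test := by
  intro path _
  unfold Spec_longest_test
  rw [longest_test_eq_cnt, longest_test_alt_eq_cnt]
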